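-- pv_equiv track=rewrite | github.com/ngruver/NOS | seq_models/util/numbering.py | replace_dash_between_x
-- ===== SOURCE A (Python) =====
-- def replace_dash_between_x(sequence):
--     new_sequence = sequence.copy()
--     i = 1
--     while i < len(sequence) - 1:
--         if sequence[i] == "-" and sequence[i - 1] == "X":
--             j = i
--             while j < len(sequence) and sequence[j] == "-":
--                 j += 1
--
--             if j < len(sequence) and sequence[j] == "X":
--                 for k in range(i, j):
--                     new_sequence[k] = "X"
--
--             i = j
--         else:
--             i += 1
--     return new_sequence
-- ===== SOURCE B (Python) =====
-- def replace_dash_between_x(sequence):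
--     out = []
--     run = 0            # length of the pending dash run
--     prev_x = False     # whether the element just before the pending run is "X"
--     for tok in sequence:
--         if tok == "-":
--             run += 1
--         else:
--             if run:
--                 fill = "X" if (prev_x and tok == "X") else "-"
--                 out.extend([fill] * run)
--                 run = 0
--             out.append(tok)
--             prev_x = (tok == "X")
--     out.extend(["-"] * run)
--     return out
-- ===== Notes on version B (the rewrite author's own statement) =====
-- stated objective: alternative
-- what changed: Replaced the index-based two-pointer scan with in-place overwrites by a single forward pass that buffers each pending dash run and flushes it as 'X's or '-'s when the next non-dash token reveals whether the run is flanked by X on both sides.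
import Mathlib
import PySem

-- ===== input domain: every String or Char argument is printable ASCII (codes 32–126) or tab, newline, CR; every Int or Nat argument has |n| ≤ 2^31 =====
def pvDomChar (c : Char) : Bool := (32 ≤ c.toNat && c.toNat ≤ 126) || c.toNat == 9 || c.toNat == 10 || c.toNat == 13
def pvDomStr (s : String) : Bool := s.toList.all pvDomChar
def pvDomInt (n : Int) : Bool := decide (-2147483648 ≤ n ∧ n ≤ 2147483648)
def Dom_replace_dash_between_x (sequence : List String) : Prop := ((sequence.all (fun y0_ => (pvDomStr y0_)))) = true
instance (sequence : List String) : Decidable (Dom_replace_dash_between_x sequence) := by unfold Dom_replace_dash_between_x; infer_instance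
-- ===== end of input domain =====

-- B replaces A's index-based two-pointer scan (with in-place overwrites) by a single
-- forward pass that buffers each pending dash run and flushes it when the next
-- non-dash token reveals whether the run is flanked by "X" on both sides (objective: alternative).

-- ===== PORT A =====
-- inner `while j < len(sequence) and sequence[j] == "-": j += 1`
def aInner (sequence : List String) (j : Nat) : Nat :=
  if h : j < sequence.length ∧ sequence.getD j "" = "-" then aInner sequence (j + 1) else j
termination_by sequence.length - j
decreasing_by omega

-- needed by aOuter's termination proof
theorem aInner_ge (sequence : List String) (j : Nat) : j ≤ aInner sequence j := by
  rw [aInner]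
  split
  · have := aInner_ge sequence (j + 1); omega
  · exact le_refl _
termination_by sequence.length - j
decreasing_by omega

theorem aInner_gt (sequence : List String) (i : Nat)
    (h1 : i < sequence.length) (h2 : sequence.getD i "" = "-") : i < aInner sequence i := by
  rw [aInner]
  split
  · have := aInner_ge sequence (i + 1); omega
  · next h => exact absurd ⟨h1, h2⟩ h

-- outer `while i < len(sequence) - 1: …`; new_sequence is threaded as `ns`
def aOuter (sequence ns : List String) (i : Nat) : List String :=
  if i < sequence.length - 1 then
    if h2 : sequence.getD i "" = "-" ∧ sequence.getD (i - 1) "" = "X" then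
      let j := aInner sequence i
      let ns' := if j < sequence.length ∧ sequence.getD j "" = "X"
        then (List.range' i (j - i)).foldl (fun ns k => ns.set k "X") ns
        else ns
      aOuter sequence ns' j
    else aOuter sequence ns (i + 1)
  else ns
termination_by sequence.length - i
decreasing_by
  · have := aInner_gt sequence i (by omega) h2.1; omega
  · omega

def replace_dash_between_x (sequence : List String) : List String :=
  aOuter sequence sequence 1

-- ===== PORT B =====
def bStep (st : List String × Nat × Bool) (tok : String) : List String × Nat × Bool :=
  if tok = "-" then (st.1, st.2.1 + 1, st.2.2)
  else
    let out := if st.2.1 ≠ 0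
      then st.1 ++ List.replicate st.2.1 (if st.2.2 ∧ tok = "X" then "X" else "-")
      else st.1
    (out ++ [tok], 0, decide (tok = "X"))

def replace_dash_between_x_alt (sequence : List String) : List String :=
  let st := sequence.foldl bStep ([], 0, false)
  st.1 ++ List.replicate st.2.1 "-"

-- ===== PRECONDITION & SPEC =====
def Spec_replace_dash_between_x (sequence : List String) (out : List String) : Prop := out = replace_dash_between_x_alt sequence
instance (sequence : List String) (out : List String) : Decidable (Spec_replace_dash_between_x sequence out) := by unfold Spec_replace_dash_between_x; infer_instance

-- ===== CLAIM (what is proved, stated in full; the proofs are below) =====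
def Claim_equal_replace_dash_between_x : Prop := ∀ (sequence : List String), Dom_replace_dash_between_x sequence → Spec_replace_dash_between_x sequence (replace_dash_between_x sequence)

-- ===== LEMMAS AND PROOFS =====

-- common functional spec of the pass: `run` buffered dashes, `prevX` = element before the run is "X"
def Tfun (run : Nat) (prevX : Bool) (l : List String) : List String :=
  match l with
  | [] => List.replicate run "-"
  | t :: rest =>
    if t = "-" then Tfun (run + 1) prevX rest
    else (if run ≠ 0 then List.replicate run (if prevX ∧ t = "X" then "X" else "-") else [])
          ++ t :: Tfun 0 (decide (t = "X")) rest

theorem Tfun_dash (run : Nat) (prevX : Bool) (rest : List String) :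
    Tfun run prevX ("-" :: rest) = Tfun (run + 1) prevX rest := by
  rw [Tfun]
  rw [if_pos rfl]

theorem Tfun_cons (run : Nat) (prevX : Bool) (t : String) (rest : List String) (h : t ≠ "-") :
    Tfun run prevX (t :: rest)
      = (if run ≠ 0 then List.replicate run (if prevX ∧ t = "X" then "X" else "-") else [])
          ++ t :: Tfun 0 (decide (t = "X")) rest := by
  rw [Tfun]
  rw [if_neg h]

theorem B_fold (l : List String) : ∀ (out : List String) (run : Nat) (prevX : Bool),
    (l.foldl bStep (out, run, prevX)).1 ++ List.replicate (l.foldl bStep (out, run, prevX)).2.1 "-"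
      = out ++ Tfun run prevX l := by
  induction l with
  | nil => intro out run prevX; simp [Tfun]
  | cons t rest ih =>
    intro out run prevX
    by_cases hd : t = "-"
    · subst hd
      rw [Tfun_dash]
      simp only [List.foldl_cons, bStep, reduceIte]
      exact ih out (run + 1) prevX
    · rw [Tfun_cons _ _ _ _ hd]
      simp only [List.foldl_cons, bStep, if_neg hd]
      rw [ih]
      by_cases hr : run = 0 <;> simp [hr]

theorem L1 (l : List String) : ∀ run, Tfun run false l = List.replicate run "-" ++ Tfun 0 false l := by
  induction l with
  | nil => intro run; simp [Tfun]
  | cons t rest ih =>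
    intro run
    by_cases hd : t = "-"
    · subst hd
      rw [Tfun_dash, Tfun_dash, ih (run + 1), ih 1]
      rw [show List.replicate 1 "-" ++ Tfun 0 false rest = "-" :: Tfun 0 false rest from rfl]
      rw [List.replicate_succ', List.append_assoc]
      rfl
    · rw [Tfun_cons _ _ _ _ hd, Tfun_cons _ _ _ _ hd]
      by_cases hr : run = 0 <;> simp [hr]

theorem L2a (r : List String) : ∀ (n run : Nat),
    Tfun run true (List.replicate n "-" ++ "X" :: r)
      = List.replicate (run + n) "X" ++ "X" :: Tfun 0 true r := by
  intro n
  induction n generalizing r with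
  | zero =>
    intro run
    rw [List.replicate_zero, List.nil_append, Tfun_cons _ _ _ _ (by decide)]
    by_cases hr : run = 0 <;> simp [hr]
  | succ n ih =>
    intro run
    rw [List.replicate_succ, List.cons_append, Tfun_dash, ih r (run + 1)]
    have : run + 1 + n = run + (n + 1) := by omega
    rw [this]

theorem L2b (r : List String) (t : String) (ht1 : t ≠ "-") (ht2 : t ≠ "X") : ∀ (n run : Nat),
    Tfun run true (List.replicate n "-" ++ t :: r)
      = List.replicate (run + n) "-" ++ t :: Tfun 0 false r := by
  intro n
  induction n generalizing r with
  | zero =>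
    intro run
    rw [List.replicate_zero, List.nil_append, Tfun_cons _ _ _ _ ht1]
    by_cases hr : run = 0 <;> simp [hr, ht2]
  | succ n ih =>
    intro run
    rw [List.replicate_succ, List.cons_append, Tfun_dash, ih r (run + 1)]
    have : run + 1 + n = run + (n + 1) := by omega
    rw [this]

theorem L2c : ∀ (n run : Nat), Tfun run true (List.replicate n "-") = List.replicate (run + n) "-" := by
  intro n
  induction n with
  | zero => intro run; simp [Tfun]
  | succ n ih =>
    intro run
    rw [List.replicate_succ, Tfun_dash, ih (run + 1)]
    have : run + 1 + n = run + (n + 1) := by omega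
    rw [this]

theorem Tfun_single (flag : Bool) (t : String) : Tfun 0 flag [t] = [t] := by
  by_cases hd : t = "-" <;> simp [Tfun, hd]

theorem aInner_le (sequence : List String) (j : Nat) (h : j ≤ sequence.length) :
    aInner sequence j ≤ sequence.length := by
  rw [aInner]
  split
  · exact aInner_le sequence (j + 1) (by omega)
  · exact h
termination_by sequence.length - j
decreasing_by omega

theorem aInner_dash (sequence : List String) (j : Nat) : ∀ m, j ≤ m → m < aInner sequence j →
    sequence.getD m "" = "-" := by
  intro m hm1 hm2
  rw [aInner] at hm2
  split at hm2
  · next h =>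
    rcases Nat.eq_or_lt_of_le hm1 with rfl | hlt
    · exact h.2
    · exact aInner_dash sequence (j + 1) m hlt hm2
  · omega
termination_by sequence.length - j
decreasing_by omega

theorem aInner_stop (sequence : List String) (j : Nat) (h : aInner sequence j < sequence.length) :
    sequence.getD (aInner sequence j) "" ≠ "-" := by
  by_cases hc : j < sequence.length ∧ sequence.getD j "" = "-"
  · rw [aInner, dif_pos hc] at h ⊢
    exact aInner_stop sequence (j + 1) h
  · rw [aInner, dif_neg hc] at h ⊢
    intro hdash
    exact hc ⟨h, hdash⟩
termination_by sequence.length - j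
decreasing_by omega

theorem drop_run (sequence : List String) : ∀ i j, i ≤ j → j ≤ sequence.length →
    (∀ m, i ≤ m → m < j → sequence.getD m "" = "-") →
    sequence.drop i = List.replicate (j - i) "-" ++ sequence.drop j := by
  intro i j hij hj hdash
  induction hn : j - i generalizing i with
  | zero =>
    have : i = j := by omega
    subst this
    simp
  | succ n ih =>
    have hi : i < sequence.length := by omega
    rw [List.drop_eq_getElem_cons hi]
    have hgd : sequence[i] = "-" := by
      have := hdash i le_rfl (by omega)
      rwa [List.getD_eq_getElem _ _ hi] at this
    rw [hgd, ih (i + 1) (by omega) (fun m hm1 hm2 => hdash m (by omega) hm2) (by omega)]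
    simp [List.replicate_succ]

theorem fill_fold (n : Nat) : ∀ (i : Nat) (ns : List String), i + n ≤ ns.length →
    (List.range' i n).foldl (fun ns k => ns.set k "X") ns
      = ns.take i ++ List.replicate n "X" ++ ns.drop (i + n) := by
  induction n with
  | zero => intro i ns h; simp
  | succ n ih =>
    intro i ns h
    have hi : i < ns.length := by omega
    rw [List.range'_succ, List.foldl_cons, ih (i + 1) (ns.set i "X") (by simp; omega)]
    have hset_take : (ns.set i "X").take (i + 1) = ns.take i ++ ["X"] := by
      rw [List.set_eq_take_cons_drop _ hi, List.take_append]
      simp [List.take_take, Nat.le_of_lt hi]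
    have hset_drop : (ns.set i "X").drop (i + 1 + n) = ns.drop (i + 1 + n) := by
      apply List.ext_getElem
      · simp
      · intro k h1 h2
        simp only [List.getElem_drop, List.getElem_set]
        rw [if_neg (by omega)]
    rw [hset_take, hset_drop]
    simp only [List.append_assoc, List.singleton_append]
    rw [show i + 1 + n = i + (n + 1) from by omega]
    simp [List.replicate_succ]

theorem A_lem (seq : List String) : ∀ (fuel i : Nat) (ns : List String),
    seq.length - i ≤ fuel → 1 ≤ i → ns.length = seq.length → ns.drop i = seq.drop i →
    aOuter seq ns i = ns.take i ++ Tfun 0 (decide (seq.getD (i - 1) "" = "X")) (seq.drop i) := by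
  intro fuel
  induction fuel with
  | zero =>
    intro i ns hf h1 hlen hdrop
    rw [aOuter, if_neg (by omega), List.drop_eq_nil_of_le (by omega : seq.length ≤ i)]
    rw [show Tfun 0 (decide (seq.getD (i - 1) "" = "X")) [] = [] from rfl]
    rw [List.append_nil, List.take_of_length_le (by omega)]
  | succ fuel ih =>
    intro i ns hf h1 hlen hdrop
    by_cases hcond : i < seq.length - 1
    case neg =>
      rcases Nat.lt_or_ge i seq.length with hlt | hge
      · rw [aOuter, if_neg hcond]
        have hone : seq.drop i = [seq.getD i ""] := by
          rw [List.drop_eq_getElem_cons hlt, List.drop_eq_nil_of_le (by omega),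
            List.getD_eq_getElem _ _ hlt]
        rw [hone, Tfun_single]
        conv_lhs => rw [← List.take_append_drop i ns]
        rw [hdrop, hone]
      · rw [aOuter, if_neg hcond, List.drop_eq_nil_of_le hge]
        rw [show Tfun 0 (decide (seq.getD (i - 1) "" = "X")) [] = [] from rfl]
        rw [List.append_nil, List.take_of_length_le (by omega)]
    case pos =>
      have hlt : i < seq.length := by omega
      by_cases h2 : seq.getD i "" = "-" ∧ seq.getD (i - 1) "" = "X"
      · rw [aOuter, if_pos hcond, dif_pos h2]
        dsimp only
        have hji : i < aInner seq i := aInner_gt seq i hlt h2.1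
        have hjlen : aInner seq i ≤ seq.length := aInner_le seq i (by omega)
        set j := aInner seq i with hj
        have hdash : ∀ m, i ≤ m → m < j → seq.getD m "" = "-" := aInner_dash seq i
        have hdropseq : seq.drop i = List.replicate (j - i) "-" ++ seq.drop j :=
          drop_run seq i j (by omega) hjlen hdash
        have hflag : (decide (seq.getD (i - 1) "" = "X")) = true := by
          rw [h2.2]; decide
        have hflagj : (decide (seq.getD (j - 1) "" = "X")) = false := by
          rw [hdash (j - 1) (by omega) (by omega)]; decide
        have hnsdropj : ns.drop j = seq.drop j := by
          have h1 : (ns.drop i).drop (j - i) = (seq.drop i).drop (j - i) := by rw [hdrop]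
          rwa [List.drop_drop, List.drop_drop, show i + (j - i) = j from by omega] at h1
        by_cases hfill : j < seq.length ∧ seq.getD j "" = "X"
        · rw [if_pos hfill]
          have hns' : (List.range' i (j - i)).foldl (fun ns k => ns.set k "X") ns
              = (ns.take i ++ List.replicate (j - i) "X") ++ ns.drop j := by
            have := fill_fold (j - i) i ns (by omega)
            rw [show i + (j - i) = j from by omega] at this
            rw [this, List.append_assoc]
          have hPlen : (ns.take i ++ List.replicate (j - i) "X").length = j := by
            simp; omega
          rw [hns', ih j _ (by omega) (by omega) (by simp; omega)
            (by rw [List.drop_left' hPlen, hnsdropj])]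
          rw [List.take_left' hPlen]
          have hdj : seq.drop j = "X" :: seq.drop (j + 1) := by
            rw [List.drop_eq_getElem_cons hfill.1]
            have hx : seq[j] = "X" := by
              rw [← List.getD_eq_getElem _ _ hfill.1]; exact hfill.2
            rw [hx]
          rw [hflagj, hflag, hdropseq, hdj, L2a (seq.drop (j + 1)) (j - i) 0,
            Tfun_cons 0 false "X" _ (by decide)]
          simp
        · rw [if_neg hfill]
          rw [ih j ns (by omega) (by omega) hlen hnsdropj]
          have htj : ns.take j = ns.take i ++ List.replicate (j - i) "-" := by
            conv_lhs => rw [show j = i + (j - i) from by omega]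
            rw [List.take_add, hdrop, hdropseq, List.take_left' (by simp)]
          rw [htj, hflag, hflagj, hdropseq]
          rcases Nat.lt_or_ge j seq.length with hjlt | hjge
          · have hdj : seq.drop j = seq.getD j "" :: seq.drop (j + 1) := by
              rw [List.drop_eq_getElem_cons hjlt, List.getD_eq_getElem _ _ hjlt]
            have htd : seq.getD j "" ≠ "-" := aInner_stop seq i hjlt
            have htx : seq.getD j "" ≠ "X" := fun hx => hfill ⟨hjlt, hx⟩
            have hdx : decide (seq.getD j "" = "X") = false := decide_eq_false htx
            rw [hdj, L2b (seq.drop (j + 1)) _ htd htx (j - i) 0,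
              Tfun_cons 0 false _ _ htd, hdx]
            simp
          · rw [List.drop_eq_nil_of_le hjge, List.append_nil, L2c (j - i) 0]
            rw [show Tfun 0 false ([] : List String) = [] from rfl]
            simp
      · rw [aOuter, if_pos hcond, dif_neg h2]
        have hdropseq : seq.drop i = seq.getD i "" :: seq.drop (i + 1) := by
          rw [List.drop_eq_getElem_cons hlt, List.getD_eq_getElem _ _ hlt]
        have hdrop1 : ns.drop (i + 1) = seq.drop (i + 1) := by
          have h1 : (ns.drop i).drop 1 = (seq.drop i).drop 1 := by rw [hdrop]
          rwa [List.drop_drop, List.drop_drop] at h1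
        rw [ih (i + 1) ns (by omega) (by omega) hlen hdrop1]
        have hnsi : ns[i]? = some (seq.getD i "") := by
          rw [← List.head?_drop, hdrop, List.head?_drop, List.getElem?_eq_getElem hlt,
            List.getD_eq_getElem _ _ hlt]
        have htake : ns.take (i + 1) = ns.take i ++ [seq.getD i ""] := by
          rw [List.take_add_one, hnsi]
          rfl
        rw [htake, show i + 1 - 1 = i from by omega, hdropseq]
        by_cases ht : seq.getD i "" = "-"
        · have hx : seq.getD (i - 1) "" ≠ "X" := fun hxx => h2 ⟨ht, hxx⟩
          have hfl : decide (seq.getD (i - 1) "" = "X") = false := decide_eq_false hx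
          rw [ht, hfl, Tfun_dash, L1 (seq.drop (i + 1)) (0 + 1)]
          simp
        · rw [Tfun_cons _ _ _ _ ht]
          simp

-- ===== VERDICT (by name: the statement is the Claim_ definition above) =====
theorem B_eq_Tfun (seq : List String) : replace_dash_between_x_alt seq = Tfun 0 false seq := by
  unfold replace_dash_between_x_alt
  have := B_fold seq [] 0 false
  simpa using this

theorem replace_dash_between_x_spec : Claim_equal_replace_dash_between_x := by
  intro seq _
  unfold Spec_replace_dash_between_x
  rw [B_eq_Tfun, replace_dash_between_x,
    A_lem seq seq.length 1 seq (by omega) le_rfl rfl rfl]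
  cases seq with
  | nil => simp [Tfun]
  | cons t rest =>
    simp only [List.take_succ_cons, List.take_zero, List.drop_succ_cons, List.drop_zero]
    by_cases ht : t = "-"
    · subst ht
      rw [Tfun_dash, L1 rest 1]
      simp
    · rw [Tfun_cons _ _ _ _ ht]
      simp
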